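-- pv_equiv track=rewrite | github.com/james5635/GeekForGeek-Data-Structure-and-Algorithm | hashing/hard/sum_unique_subarray_sums/solution.py | get_all_unique_subarray_sums
-- ===== SOURCE A (Python) =====
-- from typing import List, Set
--
-- def get_all_unique_subarray_sums(arr: List[int]) -> Set[int]:
--     """
--     Get set of all unique subarray sums.
--
--     Returns:
--         Set containing all unique subarray sums
--     """
--     n = len(arr)
--     unique_sums = set()
--
--     for i in range(n):
--         current_sum = 0
--         for j in range(i, n):
--             current_sum += arr[j]
--             unique_sums.add(current_sum)
--
--     return unique_sums
-- ===== SOURCE B (Python) =====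
-- from typing import List, Set
--
-- def get_all_unique_subarray_sums(arr: List[int]) -> Set[int]:
--     """Prefix-sum table, then pairwise differences P[j] - P[i] for i < j."""
--     n = len(arr)
--     prefix = [0]
--     running = 0
--     for x in arr:
--         running += x
--         prefix.append(running)
--     sums = set()
--     for i in range(n + 1):
--         for j in range(i + 1, n + 1):
--             sums.add(prefix[j] - prefix[i])
--     return sums
-- ===== Notes on version B (the rewrite author's own statement) =====
-- stated objective: alternative
-- what changed: Replaces the incremental inner accumulator with a precomputed prefix-sum table built in one pass, then collects pairwise differences P[j]-P[i]; no running sum is threaded through the inner loop.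
import Mathlib
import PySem

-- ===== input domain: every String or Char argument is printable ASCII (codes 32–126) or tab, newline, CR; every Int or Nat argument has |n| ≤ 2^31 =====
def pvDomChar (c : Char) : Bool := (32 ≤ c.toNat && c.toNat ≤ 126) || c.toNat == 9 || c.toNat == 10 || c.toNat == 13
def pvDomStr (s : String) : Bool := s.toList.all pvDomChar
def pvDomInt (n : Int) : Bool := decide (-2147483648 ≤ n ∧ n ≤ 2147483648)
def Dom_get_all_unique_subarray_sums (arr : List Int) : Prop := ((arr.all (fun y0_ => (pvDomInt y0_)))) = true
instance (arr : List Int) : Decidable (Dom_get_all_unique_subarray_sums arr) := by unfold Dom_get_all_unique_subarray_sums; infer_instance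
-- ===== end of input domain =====

-- B replaces A's threaded inner accumulator with a precomputed prefix-sum table and
-- pairwise differences; same O(n^2) cost, different decomposition (objective: alternative).

-- ===== PORT A =====
def get_all_unique_subarray_sums (arr : List Int) : List Int :=
  let n : Int := arr.length
  (PySem.List.pyRange 0 n 1).foldl
    (fun unique_sums i =>
      ((PySem.List.pyRange i n 1).foldl
        (fun (p : Int × PySem.Set Int) j =>
          let current_sum := p.1 + PySem.List.pyGetD arr j 0
          (current_sum, PySem.Set.add p.2 current_sum))
        (0, unique_sums)).2)
    PySem.Set.empty

-- ===== PORT B =====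
def get_all_unique_subarray_sums_alt (arr : List Int) : List Int :=
  let n : Int := arr.length
  let prefix_ := (arr.foldl
    (fun (p : Int × List Int) x => (p.1 + x, p.2 ++ [p.1 + x]))
    ((0 : Int), [(0 : Int)])).2
  (PySem.List.pyRange 0 (n + 1) 1).foldl
    (fun sums i =>
      (PySem.List.pyRange (i + 1) (n + 1) 1).foldl
        (fun sums j =>
          PySem.Set.add sums (PySem.List.pyGetD prefix_ j 0 - PySem.List.pyGetD prefix_ i 0))
        sums)
    PySem.Set.empty

-- ===== PRECONDITION & SPEC =====
def Spec_get_all_unique_subarray_sums (arr : List Int) (out : List Int) : Prop := out = get_all_unique_subarray_sums_alt arr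
instance (arr : List Int) (out : List Int) : Decidable (Spec_get_all_unique_subarray_sums arr out) := by unfold Spec_get_all_unique_subarray_sums; infer_instance

-- ===== CLAIM (what is proved, stated in full; the proofs are below) =====
def Claim_equal_get_all_unique_subarray_sums : Prop := ∀ (arr : List Int), Dom_get_all_unique_subarray_sums arr → Spec_get_all_unique_subarray_sums arr (get_all_unique_subarray_sums arr)

-- ===== LEMMAS AND PROOFS =====

-- running sum of prefix k elements
def pvPf (arr : List Int) (i : Int) : Int := (arr.take i.toNat).sum

-- the values A's inner loop inserts, given running offset c
def pvVals (g : Int → Int) (c : Int) : List Int → List Int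
  | [] => []
  | j :: t => (c + g j) :: pvVals g (c + g j) t

def pvAddAll (s : PySem.Set Int) (l : List Int) : PySem.Set Int := l.foldl PySem.Set.add s

-- running-prefix list built by B's first loop
def pvScan (s : Int) : List Int → List Int
  | [] => []
  | x :: t => (s + x) :: pvScan (s + x) t

theorem pvInnerA (g : Int → Int) :
    ∀ (L : List Int) (c : Int) (s : PySem.Set Int),
      (L.foldl (fun (p : Int × PySem.Set Int) j =>
          (p.1 + g j, PySem.Set.add p.2 (p.1 + g j))) (c, s)).2
        = pvAddAll s (pvVals g c L) := by
  intro L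
  induction L with
  | nil => intro c s; rfl
  | cons j t ih => intro c s; simp [pvVals, pvAddAll, List.foldl] at *; exact ih _ _

theorem pvInnerB (h : Int → Int) :
    ∀ (L : List Int) (s : PySem.Set Int),
      (L.foldl (fun s j => PySem.Set.add s (h j)) s) = pvAddAll s (L.map h) := by
  intro L
  induction L with
  | nil => intro s; rfl
  | cons j t ih => intro s; simp [pvAddAll, List.foldl] at *; exact ih _

theorem pvScanFold :
    ∀ (arr : List Int) (s : Int) (acc : List Int),
      (arr.foldl (fun (p : Int × List Int) x => (p.1 + x, p.2 ++ [p.1 + x])) (s, acc)).2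
        = acc ++ pvScan s arr := by
  intro arr
  induction arr with
  | nil => intro s acc; simp [pvScan]
  | cons x t ih => intro s acc; simp [pvScan, List.foldl, ih]

theorem pvScanEq :
    ∀ (arr : List Int) (s : Int),
      pvScan s arr = (List.range arr.length).map (fun k => s + (arr.take (k + 1)).sum) := by
  intro arr
  induction arr with
  | nil => intro s; simp [pvScan]
  | cons x t ih =>
    intro s
    simp [pvScan, List.range_succ_eq_map, ih, List.map_map, Function.comp]
    intro k _
    ring

-- B's prefix list is the table of prefix sums
theorem pvPrefixEq (arr : List Int) :
    (arr.foldl (fun (p : Int × List Int) x => (p.1 + x, p.2 ++ [p.1 + x]))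
        ((0 : Int), [(0 : Int)])).2
      = (List.range (arr.length + 1)).map (fun k => (arr.take k).sum) := by
  rw [pvScanFold, pvScanEq]
  simp [List.range_succ_eq_map, List.map_map, Function.comp]

-- lookup in the prefix table
theorem pvPrefixGet (arr : List Int) (j : Int) (h0 : 0 ≤ j) (h1 : j ≤ (arr.length : Int)) :
    PySem.List.pyGetD ((List.range (arr.length + 1)).map (fun k => (arr.take k).sum)) j 0
      = pvPf arr j := by
  have hj : j = (j.toNat : Int) := (Int.toNat_of_nonneg h0).symm
  rw [hj, PySem.List.pyGetD_natCast, PySem.List.getD_map_range]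
  · rfl
  · omega

-- one step of the running sum
theorem pvPfStep (arr : List Int) (i : Int) (h0 : 0 ≤ i) (h1 : i < (arr.length : Int)) :
    pvPf arr i + PySem.List.pyGetD arr i 0 = pvPf arr (i + 1) := by
  have hi : i = (i.toNat : Int) := (Int.toNat_of_nonneg h0).symm
  have hlt : i.toNat < arr.length := by omega
  rw [hi, PySem.List.pyGetD_natCast]
  unfold pvPf
  have h2 : ((i.toNat : Int) + 1).toNat = i.toNat + 1 := by omega
  have h3 : ((i.toNat : Int)).toNat = i.toNat := by omega
  rw [h2, h3, List.take_add_one, List.sum_append]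
  simp [List.getD_eq_getElem?_getD, List.getElem?_eq_getElem hlt]

-- A's inner value list equals the pairwise-difference list
theorem pvValsEq (arr : List Int) :
    ∀ (k : Nat) (i c : Int), 0 ≤ i → i.toNat + k = arr.length →
      pvVals (fun j => PySem.List.pyGetD arr j 0) c (PySem.List.pyRange i (arr.length : Int) 1)
        = (PySem.List.pyRange (i + 1) ((arr.length : Int) + 1) 1).map
            (fun j => c + pvPf arr j - pvPf arr i) := by
  intro k
  induction k with
  | zero =>
    intro i c h0 hk
    have : i = (arr.length : Int) := by omega
    subst this
    rw [PySem.List.pyRange_one_eq_nil (by omega), PySem.List.pyRange_one_eq_nil (by omega)]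
    rfl
  | succ k ih =>
    intro i c h0 hk
    have hlt : i < (arr.length : Int) := by omega
    rw [PySem.List.pyRange_one_cons hlt, PySem.List.pyRange_one_cons (by omega : i + 1 < (arr.length : Int) + 1)]
    simp only [pvVals, List.map_cons]
    congr 1
    · have := pvPfStep arr i h0 hlt
      omega
    · rw [ih (i + 1) (c + PySem.List.pyGetD arr i 0) (by omega) (by omega)]
      apply List.map_congr_left
      intro j _
      have := pvPfStep arr i h0 hlt
      omega

theorem get_all_unique_subarray_sums_spec' :
    ∀ (arr : List Int), get_all_unique_subarray_sums arr = get_all_unique_subarray_sums_alt arr := by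
  intro arr
  unfold get_all_unique_subarray_sums get_all_unique_subarray_sums_alt
  simp only []
  set n : Int := (arr.length : Int) with hn
  rw [pvPrefixEq]
  set P := (List.range (arr.length + 1)).map (fun k => (arr.take k).sum) with hP
  -- rewrite A's outer step
  have hA : ∀ (s : PySem.Set Int) (i : Int), i ∈ PySem.List.pyRange 0 n 1 →
      ((PySem.List.pyRange i n 1).foldl
        (fun (p : Int × PySem.Set Int) j =>
          let current_sum := p.1 + PySem.List.pyGetD arr j 0
          (current_sum, PySem.Set.add p.2 current_sum))
        (0, s)).2
      = (PySem.List.pyRange (i + 1) (n + 1) 1).foldl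
          (fun s j => PySem.Set.add s (PySem.List.pyGetD P j 0 - PySem.List.pyGetD P i 0)) s := by
    intro s i hi
    rw [PySem.List.mem_pyRange_one] at hi
    rw [pvInnerA, pvInnerB]
    congr 1
    rw [pvValsEq arr (n - i).toNat i 0 hi.1 (by omega)]
    apply List.map_congr_left
    intro j hj
    rw [PySem.List.mem_pyRange_one] at hj
    rw [hP, pvPrefixGet arr j (by omega) (by omega), pvPrefixGet arr i (by omega) (by omega)]
    omega
  rw [PySem.List.foldl_congr_mem _ _ _ _ hA]
  -- split B's outer range: last iteration (i = n) is a no-op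
  rw [PySem.List.pyRange_one_succ_right (by omega : (0:Int) ≤ n), List.foldl_append]
  simp [PySem.List.pyRange_one_eq_nil (le_refl (n + 1))]

-- ===== VERDICT (by name: the statement is the Claim_ definition above) =====
theorem get_all_unique_subarray_sums_spec : Claim_equal_get_all_unique_subarray_sums := by
  intro arr _
  unfold Spec_get_all_unique_subarray_sums
  exact get_all_unique_subarray_sums_spec' arr
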